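-- pv_equiv track=rewrite | github.com/ryzzaki/ECS640-Coursework | scripts/part_c.py | reducer_block_aggregate
-- ===== SOURCE A (Python) =====
-- def reducer_block_aggregate(block_num, values):
--     try:
--         values = [x for x in values]
--         data_types = {}
--         for list in values:
--             key = list[0]
--             vals = list[1]
--             if key in data_types:
--                 data_types[key] = [sum(v)
--                                    for v in zip(data_types[key], vals)]
--             else:
--                 data_types[key] = vals
--         for data_type in data_types.items():
--             yield(block_num, data_type)
--     except:
--         pass
-- ===== SOURCE B (Python) =====
-- from functools import reduce
--
--
-- def reducer_block_aggregate(block_num, values):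
--     try:
--         values = [x for x in values]
--         # pass 1: bucket every val-list under its key, in insertion order
--         buckets = {}
--         for pair in values:
--             buckets.setdefault(pair[0], []).append(pair[1])
--         # pass 2: element-wise aggregate of each bucket (no initializer:
--         # a single-element bucket comes back unchanged)
--         for key, bucket in buckets.items():
--             yield (block_num,
--                    (key, reduce(lambda a, b: [x + y for x, y in zip(a, b)],
--                                 bucket)))
--     except:
--         pass
-- ===== Notes on version B (the rewrite author's own statement) =====
-- stated objective: alternative
-- what changed: Replaces A's single streaming loop (which re-aggregates elementwise on every duplicate key into one dict) by a two-pass decomposition: first group the raw val-lists into per-key buckets with setdefault, then fold each bucket with functools.reduce (no initializer, so a single-occurrence key returns its original list) when yielding.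
import Mathlib
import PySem

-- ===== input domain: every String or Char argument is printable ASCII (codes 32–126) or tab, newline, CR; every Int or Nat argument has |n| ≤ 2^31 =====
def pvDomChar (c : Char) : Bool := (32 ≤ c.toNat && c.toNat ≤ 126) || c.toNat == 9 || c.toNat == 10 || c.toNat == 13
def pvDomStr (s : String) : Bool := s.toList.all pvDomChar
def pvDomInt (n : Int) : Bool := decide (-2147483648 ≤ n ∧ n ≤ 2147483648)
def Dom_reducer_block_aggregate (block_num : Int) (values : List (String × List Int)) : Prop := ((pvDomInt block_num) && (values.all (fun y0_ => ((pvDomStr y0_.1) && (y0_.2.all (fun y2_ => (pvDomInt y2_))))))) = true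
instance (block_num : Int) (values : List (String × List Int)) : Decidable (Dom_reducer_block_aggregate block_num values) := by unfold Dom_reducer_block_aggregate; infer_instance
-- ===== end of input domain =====

-- B replaces A's single loop (elementwise re-aggregation into one dict) by a two-pass
-- decomposition: bucket the raw val-lists per key, then reduce each bucket when yielding.
-- Return-value equivalence only (both are generators; the yielded sequences are compared).

-- ===== PORT A =====
-- [sum(v) for v in zip(cur, vals)]  (zip truncates to the shorter list)
def pvZipSum (a b : List Int) : List Int := (a.zip b).map (fun p => p.1 + p.2)

def reducer_block_aggregate (block_num : Int) (values : List (String × List Int)) : List (Int × (String × List Int)) :=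
  let data_types : PySem.Dict String (List Int) :=
    values.foldl (fun d l =>
      let key := l.1
      let vals := l.2
      if d.contains key then d.insert key (pvZipSum (d.getD key []) vals)
      else d.insert key vals) PySem.Dict.empty
  data_types.items.map (fun data_type => (block_num, data_type))

-- ===== PORT B =====
-- reduce(lambda a, b: [x+y for x, y in zip(a, b)], bucket) — no initializer
def pvReduceZipSum (bucket : List (List Int)) : List Int :=
  match bucket with
  | [] => []        -- never reached: every bucket gets at least one appended list
  | h :: t => t.foldl pvZipSum h

def reducer_block_aggregate_alt (block_num : Int) (values : List (String × List Int)) : List (Int × (String × List Int)) :=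
  let buckets : PySem.Dict String (List (List Int)) :=
    values.foldl (fun d pair => d.modify pair.1 [] (· ++ [pair.2])) PySem.Dict.empty
  buckets.items.map (fun kb => (block_num, (kb.1, pvReduceZipSum kb.2)))

-- ===== PRECONDITION & SPEC =====
def Spec_reducer_block_aggregate (block_num : Int) (values : List (String × List Int)) (out : List (Int × (String × List Int))) : Prop := out = reducer_block_aggregate_alt block_num values
instance (block_num : Int) (values : List (String × List Int)) (out : List (Int × (String × List Int))) : Decidable (Spec_reducer_block_aggregate block_num values out) := by unfold Spec_reducer_block_aggregate; infer_instance

-- ===== CLAIM (what is proved, stated in full; the proofs are below) =====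
def Claim_equal_reducer_block_aggregate : Prop := ∀ (block_num : Int) (values : List (String × List Int)), Dom_reducer_block_aggregate block_num values → Spec_reducer_block_aggregate block_num values (reducer_block_aggregate block_num values)

-- ===== LEMMAS AND PROOFS =====

-- Invariant linking A's dict to B's bucket dict at every step of the fold.
def pvRel (dA : PySem.Dict String (List Int)) (dB : PySem.Dict String (List (List Int))) : Prop :=
  dA.items = dB.items.map (fun p => (p.1, pvReduceZipSum p.2)) ∧
  dB.keys.Nodup ∧
  ∀ p ∈ dB.items, p.2 ≠ []

theorem pvReduce_append (b : List (List Int)) (h : b ≠ []) (v : List Int) :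
    pvReduceZipSum (b ++ [v]) = pvZipSum (pvReduceZipSum b) v := by
  cases b with
  | nil => exact absurd rfl h
  | cons x t => simp [pvReduceZipSum, List.foldl_append]

theorem pvRel_step (dA : PySem.Dict String (List Int)) (dB : PySem.Dict String (List (List Int)))
    (h : pvRel dA dB) (k : String) (v : List Int) :
    pvRel (if dA.contains k then dA.insert k (pvZipSum (dA.getD k []) v) else dA.insert k v)
          (dB.modify k [] (· ++ [v])) := by
  obtain ⟨hitems, hnd, hne⟩ := h
  have hkeys : dA.keys = dB.keys := by
    simp [PySem.Dict.keys, hitems, Function.comp]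
  have hcont : dA.contains k = dB.contains k := by
    rw [PySem.Dict.contains_eq_decide_mem_keys, PySem.Dict.contains_eq_decide_mem_keys, hkeys]
  have hndA : dA.keys.Nodup := hkeys ▸ hnd
  show pvRel _ (dB.insert k (dB.getD k [] ++ [v]))
  refine ⟨?_, ?_, ?_⟩
  · by_cases hc : dB.contains k = true
    · -- key present: both dicts rewrite the entry in place
      obtain ⟨b, hb⟩ : ∃ b, dB.get? k = some b := by
        rcases hB : dB.get? k with _ | b
        · rw [PySem.Dict.contains_eq_isSome_get?, hB] at hc; simp at hc
        · exact ⟨b, rfl⟩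
      have hbmem : (k, b) ∈ dB.items := PySem.Dict.mem_items_of_get?_eq_some dB hb
      have hbne : b ≠ [] := hne _ hbmem
      have hgetA : dA.getD k [] = pvReduceZipSum b := by
        have : (k, pvReduceZipSum b) ∈ dA.items := by
          rw [hitems]; exact List.mem_map_of_mem hbmem
        exact PySem.Dict.getD_of_mem_items dA this hndA []
      have hgetB : dB.getD k [] = b := PySem.Dict.getD_of_get?_eq_some dB [] hb
      simp only [hcont, hc, if_true]
      rw [PySem.Dict.items_insert, PySem.Dict.items_insert]
      simp only [hc, hcont, if_true, hitems, List.map_map]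
      apply List.map_congr_left
      intro p hp
      by_cases hpk : p.1 = k
      · simp only [Function.comp, hpk, beq_self_eq_true, if_true]
        rw [hgetA, hgetB, pvReduce_append b hbne]
      · simp [Function.comp, hpk]
    · -- fresh key: both dicts append a new entry; reduce of a singleton bucket is the list itself
      have hc' : dA.contains k = false := by rw [hcont]; simpa using hc
      simp only [hcont, eq_false_of_ne_true hc, Bool.false_eq_true, if_false]
      rw [PySem.Dict.items_insert, PySem.Dict.items_insert]
      simp only [hc', eq_false_of_ne_true hc, Bool.false_eq_true, if_false, hitems, List.map_append]
      have : dB.getD k [] = [] := PySem.Dict.getD_of_not_contains dB [] (by simpa using hc)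
      simp [this, pvReduceZipSum]
  · exact PySem.Dict.nodup_keys_insert dB k _ hnd
  · intro p hp
    rcases (PySem.Dict.mem_items_insert dB k _ p).1 hp with hpe | ⟨hpd, _⟩
    · subst hpe; simp
    · exact hne _ hpd

theorem pvRel_fold (values : List (String × List Int))
    (dA : PySem.Dict String (List Int)) (dB : PySem.Dict String (List (List Int)))
    (h : pvRel dA dB) :
    pvRel (values.foldl (fun d l =>
            if d.contains l.1 then d.insert l.1 (pvZipSum (d.getD l.1 []) l.2)
            else d.insert l.1 l.2) dA)
          (values.foldl (fun d pair => d.modify pair.1 [] (· ++ [pair.2])) dB) := by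
  induction values generalizing dA dB with
  | nil => exact h
  | cons x xs ih => exact ih _ _ (pvRel_step dA dB h x.1 x.2)

-- ===== VERDICT (by name: the statement is the Claim_ definition above) =====
theorem reducer_block_aggregate_spec : Claim_equal_reducer_block_aggregate := by
  intro block_num values _
  show reducer_block_aggregate block_num values = reducer_block_aggregate_alt block_num values
  have h := pvRel_fold values PySem.Dict.empty PySem.Dict.empty
    ⟨rfl, PySem.Dict.nodup_keys_empty, by decide⟩
  unfold reducer_block_aggregate reducer_block_aggregate_alt
  simp only [h.1, List.map_map]
  rfl
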